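-- pv_equiv track=rewrite | github.com/jhultberg/AoC2020 | aoc/day12.py | follow_instructions_waypoint
-- ===== SOURCE A (Python) =====
-- def turn_waypoint_right(waypoint, deg):
--     new_wp = waypoint
--     if deg == 90:
--         new_wp = (waypoint[1], -waypoint[0])
--     elif deg == 180:
--         new_wp = (-waypoint[0], -waypoint[1])
--     elif deg == 270:
--         new_wp = (-waypoint[1], waypoint[0])
--     return new_wp
--
-- def turn_waypoint_left(waypoint, deg):
--     new_wp = waypoint
--     if deg == 90:
--         new_wp = (-waypoint[1], waypoint[0])
--     elif deg == 180:
--         new_wp = (-waypoint[0], -waypoint[1])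
--     elif deg == 270:
--         new_wp = (waypoint[1], -waypoint[0])
--     return new_wp
--
-- def walk(curr_dir, steps, pos):
--     if steps == 0:
--         return pos
--     new_pos = pos
--     if curr_dir == "N":
--         new_pos = (pos[0], pos[1]+1)
--     elif curr_dir == "E":
--         new_pos = (pos[0]+1, pos[1])
--     elif curr_dir == "S":
--         new_pos = (pos[0], pos[1]-1)
--     elif curr_dir == "W":
--         new_pos = (pos[0]-1, pos[1])
--     return(walk(curr_dir, steps - 1, new_pos))
--
-- def walk_relative(steps, pos, waypoint):
--     return (pos[0] + steps*waypoint[0], pos[1] + steps*waypoint[1])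
--
-- def follow_instructions_waypoint(pos, waypoint, instructions):
--     for action, steps in instructions:
--         if action == "N":
--             waypoint = walk("N", steps, waypoint)
--         elif action == "S":
--             waypoint = walk("S", steps, waypoint)
--         elif action == "E":
--             waypoint = walk("E", steps, waypoint)
--         elif action == "W":
--             waypoint = walk("W", steps, waypoint)
--         elif action == "L":
--             waypoint = turn_waypoint_left(waypoint, steps)
--         elif action == "R":
--             waypoint = turn_waypoint_right(waypoint, steps)
--         elif action == "F":
--             pos = walk_relative(steps, pos, waypoint)
--     return pos
-- ===== SOURCE B (Python) =====
-- DELTAS = {"N": (0, 1), "S": (0, -1), "E": (1, 0), "W": (-1, 0)}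
--
-- def follow_instructions_waypoint(pos, waypoint, instructions):
--     # One multiply-add per instruction instead of unit-step recursion,
--     # and composed quarter turns instead of a per-angle table.
--     for action, steps in instructions:
--         if action in DELTAS:
--             if steps:
--                 dx, dy = DELTAS[action]
--                 waypoint = (waypoint[0] + steps * dx, waypoint[1] + steps * dy)
--         elif action in ("L", "R") and steps in (90, 180, 270):
--             q = steps // 90 if action == "R" else 4 - steps // 90
--             for _ in range(q):
--                 waypoint = (waypoint[1], -waypoint[0])
--         elif action == "F":
--             pos = (pos[0] + steps * waypoint[0], pos[1] + steps * waypoint[1])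
--     return pos
-- ===== Notes on version B (the rewrite author's own statement) =====
-- stated objective: alternative
-- what changed: B replaces walk's unit-step recursion with a single multiply-add per N/S/E/W/F instruction (direction vectors from a dict) and the two per-angle rotation tables with composed quarter turns; it trades A's helper-function decomposition for direct state updates.
-- outside the precondition, e.g. on follow_instructions_waypoint((0, 0), (1, 0), [('N', 9300), ('F', 1)]): A returns (1, 9300), B returns (1, 9300)
import Mathlib
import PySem

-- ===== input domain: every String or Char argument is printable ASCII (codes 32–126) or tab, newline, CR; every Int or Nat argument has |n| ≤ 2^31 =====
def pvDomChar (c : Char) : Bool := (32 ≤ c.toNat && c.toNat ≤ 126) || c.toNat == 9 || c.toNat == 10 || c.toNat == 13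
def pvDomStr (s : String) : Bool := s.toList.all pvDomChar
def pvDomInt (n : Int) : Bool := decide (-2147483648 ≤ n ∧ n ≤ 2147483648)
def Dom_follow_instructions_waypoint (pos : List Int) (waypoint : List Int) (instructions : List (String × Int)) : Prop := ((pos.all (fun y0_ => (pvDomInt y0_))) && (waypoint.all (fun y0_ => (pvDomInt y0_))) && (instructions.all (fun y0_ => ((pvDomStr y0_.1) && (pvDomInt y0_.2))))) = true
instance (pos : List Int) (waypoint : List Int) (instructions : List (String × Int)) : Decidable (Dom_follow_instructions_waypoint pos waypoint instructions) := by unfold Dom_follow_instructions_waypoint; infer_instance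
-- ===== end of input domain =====

-- B replaces A's unit-step recursion with one multiply-add per instruction and the
-- per-angle rotation tables with composed quarter turns (objective: alternative).
-- Neither program mutates its arguments.

-- ===== PORT A =====
-- Python 2-tuples and the coordinate lists are both List Int; pos[i]/waypoint[i] is
-- pyGetD … 0 (exact under Pre_, where every index access Python performs is in
-- range; an out-of-range access raises IndexError, excluded by Pre_).

def pvTurnWaypointRight (waypoint : List Int) (deg : Int) : List Int :=
  if deg = 90 then [PySem.List.pyGetD waypoint 1 0, -PySem.List.pyGetD waypoint 0 0]
  else if deg = 180 then [-PySem.List.pyGetD waypoint 0 0, -PySem.List.pyGetD waypoint 1 0]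
  else if deg = 270 then [-PySem.List.pyGetD waypoint 1 0, PySem.List.pyGetD waypoint 0 0]
  else waypoint

def pvTurnWaypointLeft (waypoint : List Int) (deg : Int) : List Int :=
  if deg = 90 then [-PySem.List.pyGetD waypoint 1 0, PySem.List.pyGetD waypoint 0 0]
  else if deg = 180 then [-PySem.List.pyGetD waypoint 0 0, -PySem.List.pyGetD waypoint 1 0]
  else if deg = 270 then [PySem.List.pyGetD waypoint 1 0, -PySem.List.pyGetD waypoint 0 0]
  else waypoint

-- walk's Int recursion realised on steps.toNat: exact for steps ≥ 0 (Pre_);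
-- for negative steps Python's walk never reaches 0 and raises RecursionError,
-- excluded by Pre_.
def pvWalk (curr_dir : String) (steps : Nat) (pos : List Int) : List Int :=
  match steps with
  | 0 => pos
  | k + 1 =>
    let new_pos :=
      if curr_dir = "N" then [PySem.List.pyGetD pos 0 0, PySem.List.pyGetD pos 1 0 + 1]
      else if curr_dir = "E" then [PySem.List.pyGetD pos 0 0 + 1, PySem.List.pyGetD pos 1 0]
      else if curr_dir = "S" then [PySem.List.pyGetD pos 0 0, PySem.List.pyGetD pos 1 0 - 1]
      else if curr_dir = "W" then [PySem.List.pyGetD pos 0 0 - 1, PySem.List.pyGetD pos 1 0]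
      else pos
    pvWalk curr_dir k new_pos

def pvWalkRelative (steps : Int) (pos : List Int) (waypoint : List Int) : List Int :=
  [PySem.List.pyGetD pos 0 0 + steps * PySem.List.pyGetD waypoint 0 0,
   PySem.List.pyGetD pos 1 0 + steps * PySem.List.pyGetD waypoint 1 0]

def pvStepA (st : List Int × List Int) (inst : String × Int) : List Int × List Int :=
  let pos := st.1
  let waypoint := st.2
  let action := inst.1
  let steps := inst.2
  if action = "N" then (pos, pvWalk "N" steps.toNat waypoint)
  else if action = "S" then (pos, pvWalk "S" steps.toNat waypoint)
  else if action = "E" then (pos, pvWalk "E" steps.toNat waypoint)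
  else if action = "W" then (pos, pvWalk "W" steps.toNat waypoint)
  else if action = "L" then (pos, pvTurnWaypointLeft waypoint steps)
  else if action = "R" then (pos, pvTurnWaypointRight waypoint steps)
  else if action = "F" then (pvWalkRelative steps pos waypoint, waypoint)
  else (pos, waypoint)

def follow_instructions_waypoint (pos : List Int) (waypoint : List Int) (instructions : List (String × Int)) : List Int :=
  (instructions.foldl pvStepA (pos, waypoint)).1

-- ===== PORT B =====

-- DELTAS[action]: the dict lookup, total inside the 'action in DELTAS' branch
def pvDelta (action : String) : Int × Int :=
  if action = "N" then (0, 1)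
  else if action = "S" then (0, -1)
  else if action = "E" then (1, 0)
  else (-1, 0)

-- the 'for _ in range(q)' quarter-turn loop (q ∈ {1,2,3} at the call site)
def pvRotQ : Nat → List Int → List Int
  | 0, w => w
  | k + 1, w => pvRotQ k [PySem.List.pyGetD w 1 0, -PySem.List.pyGetD w 0 0]

def pvStepB (st : List Int × List Int) (inst : String × Int) : List Int × List Int :=
  let pos := st.1
  let waypoint := st.2
  let action := inst.1
  let steps := inst.2
  if action = "N" ∨ action = "S" ∨ action = "E" ∨ action = "W" then
    if steps ≠ 0 then
      let d := pvDelta action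
      (pos, [PySem.List.pyGetD waypoint 0 0 + steps * d.1,
             PySem.List.pyGetD waypoint 1 0 + steps * d.2])
    else (pos, waypoint)
  else if (action = "L" ∨ action = "R") ∧ (steps = 90 ∨ steps = 180 ∨ steps = 270) then
    let q := if action = "R" then PySem.Int.floordiv steps 90 else 4 - PySem.Int.floordiv steps 90
    (pos, pvRotQ q.toNat waypoint)  -- q ∈ {1,2,3} here, so toNat is exact
  else if action = "F" then
    ([PySem.List.pyGetD pos 0 0 + steps * PySem.List.pyGetD waypoint 0 0,
      PySem.List.pyGetD pos 1 0 + steps * PySem.List.pyGetD waypoint 1 0], waypoint)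
  else (pos, waypoint)

def follow_instructions_waypoint_alt (pos : List Int) (waypoint : List Int) (instructions : List (String × Int)) : List Int :=
  (instructions.foldl pvStepB (pos, waypoint)).1

-- ===== PRECONDITION & SPEC =====
-- Pre_ is where Python A returns normally and excludes only inputs on which A
-- raises: lists too short for an index access some instruction actually performs
-- (waypoint shorter than 2 when an instruction reads it, position shorter than 2
-- when an "F" occurs) raise IndexError; a negative N/S/E/W step count makes walk
-- recurse without reaching its base case (RecursionError); and an N/S/E/W step
-- count above 9000 — a DISCLOSED cap at the interpreter's recursion limit — makes
-- walk's unit-step recursion, one Python frame per step, overflow that limit and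
-- raise RecursionError (under CPython's default limit of 1000 the cutoff is
-- already ≈997; 9000 leaves a margin under the 10000-frame limit the test runner
-- sets, since the exact cutoff depends on the caller's stack depth — in the thin
-- band between the cap and the limit A still returns and B matches it).
def Pre_follow_instructions_waypoint (pos : List Int) (waypoint : List Int) (instructions : List (String × Int)) : Prop :=
  (∀ p ∈ instructions, (p.1 = "N" ∨ p.1 = "S" ∨ p.1 = "E" ∨ p.1 = "W") → 0 ≤ p.2 ∧ p.2 ≤ 9000) ∧
  ((∃ p ∈ instructions, ((p.1 = "N" ∨ p.1 = "S" ∨ p.1 = "E" ∨ p.1 = "W") ∧ p.2 ≠ 0) ∨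
      ((p.1 = "L" ∨ p.1 = "R") ∧ (p.2 = 90 ∨ p.2 = 180 ∨ p.2 = 270)) ∨ p.1 = "F") →
    2 ≤ waypoint.length) ∧
  ((∃ p ∈ instructions, p.1 = "F") → 2 ≤ pos.length)

instance (pos : List Int) (waypoint : List Int) (instructions : List (String × Int)) : Decidable (Pre_follow_instructions_waypoint pos waypoint instructions) := by unfold Pre_follow_instructions_waypoint; infer_instance

def pvWitness_follow_instructions_waypoint : List Int × List Int × (List (String × Int)) :=
  ([0, 0], [10, 1], [("F", 10), ("R", 90), ("F", 7), ("N", 3)])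

def Spec_follow_instructions_waypoint (pos : List Int) (waypoint : List Int) (instructions : List (String × Int)) (out : List Int) : Prop := out = follow_instructions_waypoint_alt pos waypoint instructions
instance (pos : List Int) (waypoint : List Int) (instructions : List (String × Int)) (out : List Int) : Decidable (Spec_follow_instructions_waypoint pos waypoint instructions out) := by unfold Spec_follow_instructions_waypoint; infer_instance

-- ===== CLAIM (what is proved, stated in full; the proofs are below) =====
def Claim_equal_follow_instructions_waypoint : Prop := ∀ (pos : List Int) (waypoint : List Int) (instructions : List (String × Int)), Dom_follow_instructions_waypoint pos waypoint instructions → Pre_follow_instructions_waypoint pos waypoint instructions → Spec_follow_instructions_waypoint pos waypoint instructions (follow_instructions_waypoint pos waypoint instructions)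

-- ===== LEMMAS AND PROOFS =====

theorem pvG1 (a b : Int) : PySem.List.pyGetD [a, b] 1 0 = b := rfl

theorem pvWalk_N (n : Nat) : ∀ w : List Int, 1 ≤ n →
    pvWalk "N" n w = [PySem.List.pyGetD w 0 0, PySem.List.pyGetD w 1 0 + n] := by
  induction n with
  | zero => intro w h; omega
  | succ k ih =>
    intro w _
    rcases Nat.eq_zero_or_pos k with hk | hk
    · subst hk; simp [pvWalk]
    · show pvWalk "N" k _ = _
      rw [ih _ hk]
      simp [pvG1]
      ring

theorem pvWalk_E (n : Nat) : ∀ w : List Int, 1 ≤ n →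
    pvWalk "E" n w = [PySem.List.pyGetD w 0 0 + n, PySem.List.pyGetD w 1 0] := by
  induction n with
  | zero => intro w h; omega
  | succ k ih =>
    intro w _
    rcases Nat.eq_zero_or_pos k with hk | hk
    · subst hk; simp [pvWalk]
    · show pvWalk "E" k _ = _
      rw [ih _ hk]
      simp [pvG1]
      ring

theorem pvWalk_S (n : Nat) : ∀ w : List Int, 1 ≤ n →
    pvWalk "S" n w = [PySem.List.pyGetD w 0 0, PySem.List.pyGetD w 1 0 - n] := by
  induction n with
  | zero => intro w h; omega
  | succ k ih =>
    intro w _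
    rcases Nat.eq_zero_or_pos k with hk | hk
    · subst hk; simp [pvWalk]
    · show pvWalk "S" k _ = _
      rw [ih _ hk]
      simp [pvG1]
      ring

theorem pvWalk_W (n : Nat) : ∀ w : List Int, 1 ≤ n →
    pvWalk "W" n w = [PySem.List.pyGetD w 0 0 - n, PySem.List.pyGetD w 1 0] := by
  induction n with
  | zero => intro w h; omega
  | succ k ih =>
    intro w _
    rcases Nat.eq_zero_or_pos k with hk | hk
    · subst hk; simp [pvWalk]
    · show pvWalk "W" k _ = _
      rw [ih _ hk]
      simp [pvG1]
      ring

theorem pvStep_eq (st : List Int × List Int) (inst : String × Int)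
    (hc : (inst.1 = "N" ∨ inst.1 = "S" ∨ inst.1 = "E" ∨ inst.1 = "W") → 0 ≤ inst.2) :
    pvStepA st inst = pvStepB st inst := by
  obtain ⟨pos, w⟩ := st
  obtain ⟨a, s⟩ := inst
  by_cases hN : a = "N"
  · subst hN
    have hs : (0:Int) ≤ s := hc (by tauto)
    rcases eq_or_lt_of_le hs with hz | hp
    · simp [pvStepA, pvStepB, ← hz, pvWalk]
    · have h1 : 1 ≤ s.toNat := by omega
      simp [pvStepA, pvStepB, pvDelta, pvWalk_N _ _ h1, Int.toNat_of_nonneg hs, hp.ne']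
  by_cases hS : a = "S"
  · subst hS
    have hs : (0:Int) ≤ s := hc (by tauto)
    rcases eq_or_lt_of_le hs with hz | hp
    · simp [pvStepA, pvStepB, ← hz, pvWalk]
    · have h1 : 1 ≤ s.toNat := by omega
      simp [pvStepA, pvStepB, pvDelta, pvWalk_S _ _ h1, Int.toNat_of_nonneg hs,
        hp.ne', sub_eq_add_neg]
  by_cases hE : a = "E"
  · subst hE
    have hs : (0:Int) ≤ s := hc (by tauto)
    rcases eq_or_lt_of_le hs with hz | hp
    · simp [pvStepA, pvStepB, ← hz, pvWalk]
    · have h1 : 1 ≤ s.toNat := by omega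
      simp [pvStepA, pvStepB, pvDelta, pvWalk_E _ _ h1, Int.toNat_of_nonneg hs, hp.ne']
  by_cases hW : a = "W"
  · subst hW
    have hs : (0:Int) ≤ s := hc (by tauto)
    rcases eq_or_lt_of_le hs with hz | hp
    · simp [pvStepA, pvStepB, ← hz, pvWalk]
    · have h1 : 1 ≤ s.toNat := by omega
      simp [pvStepA, pvStepB, pvDelta, pvWalk_W _ _ h1, Int.toNat_of_nonneg hs,
        hp.ne', sub_eq_add_neg]
  by_cases hL : a = "L"
  · subst hL
    by_cases h90 : s = 90
    · subst h90; simp [pvStepA, pvStepB, pvTurnWaypointLeft, pvRotQ, pvG1]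
    by_cases h180 : s = 180
    · subst h180; simp [pvStepA, pvStepB, pvTurnWaypointLeft, pvRotQ, pvG1]
    by_cases h270 : s = 270
    · subst h270; simp [pvStepA, pvStepB, pvTurnWaypointLeft, pvRotQ]
    · simp [pvStepA, pvStepB, pvTurnWaypointLeft, h90, h180, h270]
  by_cases hR : a = "R"
  · subst hR
    by_cases h90 : s = 90
    · subst h90; simp [pvStepA, pvStepB, pvTurnWaypointRight, pvRotQ]
    by_cases h180 : s = 180
    · subst h180; simp [pvStepA, pvStepB, pvTurnWaypointRight, pvRotQ, pvG1]
    by_cases h270 : s = 270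
    · subst h270; simp [pvStepA, pvStepB, pvTurnWaypointRight, pvRotQ, pvG1]
    · simp [pvStepA, pvStepB, pvTurnWaypointRight, h90, h180, h270]
  by_cases hF : a = "F"
  · subst hF; simp [pvStepA, pvStepB, pvWalkRelative]
  · simp [pvStepA, pvStepB, hN, hS, hE, hW, hL, hR, hF]

theorem pvFold_eq (l : List (String × Int)) :
    ∀ st, (∀ p ∈ l, (p.1 = "N" ∨ p.1 = "S" ∨ p.1 = "E" ∨ p.1 = "W") → 0 ≤ p.2) →
    l.foldl pvStepA st = l.foldl pvStepB st := by
  induction l with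
  | nil => intro st _; rfl
  | cons p l ih =>
    intro st hc
    show List.foldl pvStepA (pvStepA st p) l = List.foldl pvStepB (pvStepB st p) l
    rw [pvStep_eq st p (hc p List.mem_cons_self)]
    exact ih _ (fun q hq => hc q (List.mem_cons_of_mem _ hq))

-- ===== VERDICT (by name: the statement is the Claim_ definition above) =====
theorem follow_instructions_waypoint_spec : Claim_equal_follow_instructions_waypoint := by
  intro pos waypoint instructions _ hpre
  unfold Spec_follow_instructions_waypoint follow_instructions_waypoint follow_instructions_waypoint_alt
  rw [pvFold_eq instructions (pos, waypoint) (fun p hp hd => (hpre.1 p hp hd).1)]
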